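-- pv_equiv track=rewrite | github.com/ptit-wibu/Python_code_ptit | PY02028.py | solve
-- ===== SOURCE A (Python) =====
-- def snt(n):
--     if n<2:
--         return False
--     if n==2:
--         return True
--     if n%2==0:
--         return False
--     for i in range(3 , int(n**0.5)+1, 2):
--         if n % i == 0:
--             return False
--     return True
--
-- def solve(arr):
--     primes = [x for x in arr if snt(x)]
--     primes.sort()
--
--     result = []
--     primes_index = 0
--
--     for i in arr:
--         if snt(i):
--             result.append(primes[primes_index])
--             primes_index+=1
--         else:
--              result.append(i)
--
--     return result
-- ===== SOURCE B (Python) =====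
-- def snt(n):
--     if n<2:
--         return False
--     if n==2:
--         return True
--     if n%2==0:
--         return False
--     for i in range(3 , int(n**0.5)+1, 2):
--         if n % i == 0:
--             return False
--     return True
--
-- def solve(arr):
--     # selection-based: no sort; at each prime slot extract the minimum of the
--     # remaining multiset of primes
--     rem = [x for x in arr if snt(x)]
--     out = []
--     for x in arr:
--         if snt(x):
--             m = min(rem)
--             rem.remove(m)
--             out.append(m)
--         else:
--             out.append(x)
--     return out
-- ===== Notes on version B (the rewrite author's own statement) =====
-- stated objective: alternative
-- what changed: B never sorts: it keeps the multiset of not-yet-placed primes and, at each prime slot, extracts its minimum with min()+remove() (selection), where A presorts the primes and splices them back with a running index counter.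
import Mathlib
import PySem

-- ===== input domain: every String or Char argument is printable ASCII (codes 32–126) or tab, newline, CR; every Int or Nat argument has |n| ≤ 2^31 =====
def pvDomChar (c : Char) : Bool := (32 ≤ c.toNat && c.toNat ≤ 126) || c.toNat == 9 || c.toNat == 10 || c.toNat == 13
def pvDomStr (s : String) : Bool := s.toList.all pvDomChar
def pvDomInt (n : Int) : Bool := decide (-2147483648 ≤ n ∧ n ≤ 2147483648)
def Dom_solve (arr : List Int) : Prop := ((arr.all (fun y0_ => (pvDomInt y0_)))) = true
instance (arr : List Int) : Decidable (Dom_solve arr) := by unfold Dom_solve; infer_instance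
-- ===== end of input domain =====

-- B replaces A's presort-and-splice by selection: it keeps the multiset of remaining primes
-- and extracts its minimum at each prime slot (no sort call) — alternative algorithm, not faster.


-- ===== PORT A =====
-- shared helper `snt` (same function in both Python sources).
-- int(n**0.5) is ported as Nat.sqrt n.toNat: exact for 2 < n ≤ 2^31 (float sqrt is correctly
-- rounded and cannot cross an integer at this magnitude).
def snt (n : Int) : Bool :=
  if n < 2 then false
  else if n == 2 then true
  else if PySem.Int.mod n 2 == 0 then false
  else !(PySem.List.pyRange 3 (Int.ofNat (Nat.sqrt n.toNat) + 1) 2).any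
        (fun i => PySem.Int.mod n i == 0)

def solve (arr : List Int) : List Int :=
  let primes := PySem.List.sorted (arr.filter (fun x => snt x)) (fun v => v) false
  (arr.foldl
    (fun (st : List Int × Int) i =>
      if snt i then (st.1 ++ [PySem.List.pyGetD primes st.2 0], st.2 + 1)
      else (st.1 ++ [i], st.2))
    ([], 0)).1

-- ===== PORT B =====
-- min(rem) → PySem.List.min? (Python raises ValueError on empty rem; that branch is
-- unreachable here because rem always holds exactly the primes not yet placed);
-- rem.remove(m) → PySem.List.remove?.
def solve_alt (arr : List Int) : List Int :=
  (arr.foldl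
    (fun (st : List Int × List Int) x =>
      if snt x then
        match PySem.List.min? st.2 (fun y => y) with
        | some m => (st.1 ++ [m], (PySem.List.remove? st.2 m).getD st.2)
        | none => (st.1 ++ [x], st.2)
      else (st.1 ++ [x], st.2))
    ([], arr.filter (fun x => snt x))).1

-- ===== PRECONDITION & SPEC =====
def Spec_solve (arr : List Int) (out : List Int) : Prop := out = solve_alt arr
instance (arr : List Int) (out : List Int) : Decidable (Spec_solve arr out) := by unfold Spec_solve; infer_instance

-- ===== CLAIM =====
def Claim_equal_solve : Prop := ∀ (arr : List Int), Dom_solve arr → Spec_solve arr (solve arr)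

-- ===== LEMMAS AND PROOFS =====

-- reference function for A: rebuild xs, consuming the sorted primes sp at prime slots
def fillGo : List Int → List Int → List Int
  | [], _ => []
  | x :: xs, sp => if snt x then sp.headI :: fillGo xs (sp.drop 1) else x :: fillGo xs sp

-- reference function for B: rebuild xs, extracting the minimum of rem at prime slots
def selGo : List Int → List Int → List Int
  | [], _ => []
  | x :: xs, rem =>
    if snt x then
      match PySem.List.min? rem (fun y => y) with
      | some m => m :: selGo xs ((PySem.List.remove? rem m).getD rem)
      | none => x :: selGo xs rem
    else x :: selGo xs rem

theorem getD_eq_headI_drop (xs : List Int) (n : Nat) : xs.getD n 0 = (xs.drop n).headI := by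
  induction xs generalizing n with
  | nil => cases n <;> rfl
  | cons x xs ih => cases n with
    | zero => rfl
    | succ m => simpa using ih m

theorem solve_loop_eq_fillGo (sp : List Int) :
    ∀ (xs acc : List Int) (k : Int), 0 ≤ k →
      (xs.foldl
        (fun (st : List Int × Int) i =>
          if snt i then (st.1 ++ [PySem.List.pyGetD sp st.2 0], st.2 + 1)
          else (st.1 ++ [i], st.2))
        (acc, k)).1 = acc ++ fillGo xs (sp.drop k.toNat) := by
  intro xs
  induction xs with
  | nil => intro acc k hk; simp [fillGo]
  | cons x xs ih =>
    intro acc k hk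
    by_cases hx : snt x
    · have hget : PySem.List.pyGetD sp k 0 = (sp.drop k.toNat).headI := by
        rw [PySem.List.pyGetD, PySem.List.pyGet?_of_nonneg sp hk]
        simpa [List.getD] using getD_eq_headI_drop sp k.toNat
      have hdrop : sp.drop (k + 1).toNat = (sp.drop k.toNat).drop 1 := by
        rw [List.drop_drop]; congr 1; omega
      simp only [List.foldl_cons, hx, if_pos, fillGo]
      rw [ih (acc ++ [PySem.List.pyGetD sp k 0]) (k + 1) (by omega), hget, hdrop]
      simp
    · simp only [List.foldl_cons, hx, if_neg, fillGo, Bool.false_eq_true, not_false_iff]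
      rw [ih (acc ++ [x]) k hk]
      simp

theorem solve_eq_fillGo (arr : List Int) :
    solve arr = fillGo arr (PySem.List.sorted (arr.filter (fun x => snt x)) (fun v => v) false) := by
  unfold solve
  simpa using solve_loop_eq_fillGo _ arr [] 0 le_rfl

-- B's foldl loop is selGo
theorem solve_alt_loop_eq_selGo :
    ∀ (xs acc rem : List Int),
      (xs.foldl
        (fun (st : List Int × List Int) x =>
          if snt x then
            match PySem.List.min? st.2 (fun y => y) with
            | some m => (st.1 ++ [m], (PySem.List.remove? st.2 m).getD st.2)
            | none => (st.1 ++ [x], st.2)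
          else (st.1 ++ [x], st.2))
        (acc, rem)).1 = acc ++ selGo xs rem := by
  intro xs
  induction xs with
  | nil => intro acc rem; simp [selGo]
  | cons x xs ih =>
    intro acc rem
    by_cases hx : snt x
    · cases hm : PySem.List.min? rem (fun y => y) with
      | some m =>
        simp only [List.foldl_cons, hx, if_pos, hm, selGo]
        rw [ih]
        simp
      | none =>
        simp only [List.foldl_cons, hx, if_pos, hm, selGo]
        rw [ih]
        simp
    · simp only [List.foldl_cons, hx, if_neg, selGo, Bool.false_eq_true, not_false_iff]
      rw [ih]
      simp

-- extracting the minimum is taking the head of the sorted list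
theorem sorted_eq_min_cons (rem : List Int) (m : Int)
    (hm : PySem.List.min? rem (fun y => y) = some m) :
    PySem.List.sorted rem (fun v => v) false
      = m :: PySem.List.sorted (rem.erase m) (fun v => v) false := by
  have hmem : m ∈ rem := PySem.List.min?_mem hm
  refine PySem.List.sorted_id_eq_of_perm_of_pairwise _ _ ?_ ?_
  · exact ((PySem.List.sorted_perm (rem.erase m) _ false).cons m).trans
      (List.perm_cons_erase hmem).symm
  · refine List.pairwise_cons.2 ⟨?_, ?_⟩
    · intro y hy
      have hy' : y ∈ rem.erase m := (PySem.List.mem_sorted _ _ _ _).1 hy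
      exact PySem.List.min?_isMin hm y (List.mem_of_mem_erase hy')
    · simpa using PySem.List.sorted_pairwise (rem.erase m) (fun v : Int => v)

theorem selGo_eq_fillGo :
    ∀ (xs rem : List Int), (xs.filter (fun x => snt x)).length ≤ rem.length →
      selGo xs rem = fillGo xs (PySem.List.sorted rem (fun v => v) false) := by
  intro xs
  induction xs with
  | nil => intro rem _; simp [selGo, fillGo]
  | cons x xs ih =>
    intro rem hlen
    by_cases hx : snt x
    · have hne : rem ≠ [] := by
        intro h; subst h; simp [hx] at hlen
      obtain ⟨m, hm⟩ : ∃ m, PySem.List.min? rem (fun y => y) = some m := by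
        cases h : PySem.List.min? rem (fun y : Int => y) with
        | some m => exact ⟨m, rfl⟩
        | none => exact absurd (((PySem.List.min?_eq_none_iff _ _).1 h)) hne
      have hmem : m ∈ rem := PySem.List.min?_mem hm
      have hrm : (PySem.List.remove? rem m).getD rem = rem.erase m := by
        rw [PySem.List.remove?_eq_some_erase _ _ hmem]; rfl
      have hlen' : (xs.filter (fun x => snt x)).length ≤ (rem.erase m).length := by
        rw [List.length_erase_of_mem hmem]
        simp [hx] at hlen
        omega
      simp only [selGo, hx, if_pos, hm, hrm, fillGo, sorted_eq_min_cons rem m hm,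
        ih (rem.erase m) hlen']
      simp
    · have hlen' : (xs.filter (fun x => snt x)).length ≤ rem.length := by
        simpa [List.filter_cons, hx] using hlen
      simp only [selGo, hx, fillGo, Bool.false_eq_true, if_neg, not_false_iff,
        ih rem hlen']

theorem solve_alt_eq_fillGo (arr : List Int) :
    solve_alt arr
      = fillGo arr (PySem.List.sorted (arr.filter (fun x => snt x)) (fun v => v) false) := by
  unfold solve_alt
  rw [solve_alt_loop_eq_selGo arr [] _, selGo_eq_fillGo arr _ le_rfl]
  simp

-- ===== VERDICT =====
theorem solve_spec : Claim_equal_solve := by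
  intro arr _
  unfold Spec_solve
  rw [solve_eq_fillGo, solve_alt_eq_fillGo]
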